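-- pv_equiv track=rewrite | github.com/20chen-7/LeetCode-Python | 3108_minimumCost.py | minimumCost2
-- ===== SOURCE A (Python) =====
-- def minimumCost2(n, edges, queries):
--     fa = list(range(n))
--     and_ = [-1]*n
--     def find(x):
--         if fa[x]!=x:
--             fa[x] = find(fa[x])
--         return fa[x]
--     for x, y, w in edges:
--         x = find(x)
--         y = find(y)
--         and_[y] &= w
--         if x != y:
--             and_[y] &= and_[x]
--             fa[x] = y
--     return [-1 if find(s)!=find(t)else and_[find(s)] for s, t in queries]
-- ===== SOURCE B (Python) =====
-- def minimumCost2(n, edges, queries):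
--     comp = list(range(n))      # component label of each node
--     val = [-1] * n             # AND of edge weights so far, indexed by component label
--     for x, y, w in edges:
--         cx, cy = comp[x], comp[y]
--         val[cy] &= w
--         if cx != cy:
--             val[cy] &= val[cx]
--             comp = [cy if c == cx else c for c in comp]
--     return [-1 if comp[s] != comp[t] else val[comp[s]] for s, t in queries]
-- ===== Notes on version B (the rewrite author's own statement) =====
-- stated objective: alternative
-- what changed: Replaces the recursive path-compressing union-find with a flat component-label array that is relabelled on each merge (plus a weight-AND array indexed by component label), eliminating the recursive find entirely.
import Mathlib
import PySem

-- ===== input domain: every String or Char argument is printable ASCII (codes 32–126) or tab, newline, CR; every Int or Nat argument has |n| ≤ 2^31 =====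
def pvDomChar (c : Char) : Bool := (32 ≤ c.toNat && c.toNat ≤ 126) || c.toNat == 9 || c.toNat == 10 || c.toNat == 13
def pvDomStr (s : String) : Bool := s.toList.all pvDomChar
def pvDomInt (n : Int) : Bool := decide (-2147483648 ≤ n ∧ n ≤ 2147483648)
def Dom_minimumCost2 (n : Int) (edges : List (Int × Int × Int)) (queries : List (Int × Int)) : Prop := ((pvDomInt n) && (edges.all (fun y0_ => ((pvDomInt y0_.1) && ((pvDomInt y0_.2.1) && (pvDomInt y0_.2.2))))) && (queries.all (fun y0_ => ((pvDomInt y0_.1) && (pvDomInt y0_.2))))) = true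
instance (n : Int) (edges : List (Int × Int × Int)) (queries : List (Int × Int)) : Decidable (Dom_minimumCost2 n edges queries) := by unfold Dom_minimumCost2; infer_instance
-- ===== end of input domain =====

-- B replaces A's recursive path-compressing union-find by a flat component-label
-- array relabelled on each merge (objective: alternative; equivalence is about return
-- values only — A mutates nothing observable).

-- ===== PORT A =====
-- find(x) with path compression; the fuel passed below (n + |edges| + 1) strictly
-- exceeds every parent-chain length reachable under Pre_, so the 0-fuel branch is dead.
def pvFind : Nat → List Int → Int → List Int × Int
  | 0, fa, x => (fa, x)
  | fuel+1, fa, x =>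
    let p := PySem.List.pyGetD fa x 0
    if p = x then (fa, x)
    else
      let r := pvFind fuel fa p
      (PySem.List.pySetD r.1 x r.2, r.2)

-- one iteration of A's `for x, y, w in edges` loop; state = (fa, and_)
def pvStepA (L : Nat) (st : List Int × List Int) (e : Int × Int × Int) : List Int × List Int :=
  let f1 := pvFind L st.1 e.1
  let f2 := pvFind L f1.1 e.2.1
  let a1 := PySem.List.pySetD st.2 f2.2
      (PySem.Int.band (PySem.List.pyGetD st.2 f2.2 0) e.2.2)
  if f1.2 ≠ f2.2 then
    (PySem.List.pySetD f2.1 f1.2 f2.2,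
     PySem.List.pySetD a1 f2.2
       (PySem.Int.band (PySem.List.pyGetD a1 f2.2 0) (PySem.List.pyGetD a1 f1.2 0)))
  else (f2.1, a1)

-- one element of A's final comprehension (find mutates fa, so fa is threaded)
def pvQueryA (L : Nat) (andv : List Int) (st : List Int × List Int) (q : Int × Int) : List Int × List Int :=
  let f1 := pvFind L st.1 q.1
  let f2 := pvFind L f1.1 q.2
  if f1.2 ≠ f2.2 then (f2.1, st.2 ++ [-1])
  else
    let f3 := pvFind L f2.1 q.1
    (f3.1, st.2 ++ [PySem.List.pyGetD andv f3.2 0])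

def minimumCost2 (n : Int) (edges : List (Int × Int × Int)) (queries : List (Int × Int)) : List Int :=
  let fa := PySem.List.pyRange 0 n 1
  let and0 : List Int := List.replicate n.toNat (-1)
  let L := fa.length + edges.length + 1
  let st := edges.foldl (pvStepA L) (fa, and0)
  (queries.foldl (pvQueryA L st.2) (st.1, ([] : List Int))).2

-- ===== PORT B =====
-- one iteration of B's edge loop; state = (comp, val)
def pvStepB (st : List Int × List Int) (e : Int × Int × Int) : List Int × List Int :=
  let cx := PySem.List.pyGetD st.1 e.1 0
  let cy := PySem.List.pyGetD st.1 e.2.1 0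
  let v1 := PySem.List.pySetD st.2 cy
      (PySem.Int.band (PySem.List.pyGetD st.2 cy 0) e.2.2)
  if cx ≠ cy then
    (st.1.map (fun c => if c = cx then cy else c),
     PySem.List.pySetD v1 cy
       (PySem.Int.band (PySem.List.pyGetD v1 cy 0) (PySem.List.pyGetD v1 cx 0)))
  else (st.1, v1)

def minimumCost2_alt (n : Int) (edges : List (Int × Int × Int)) (queries : List (Int × Int)) : List Int :=
  let comp0 := PySem.List.pyRange 0 n 1
  let val0 : List Int := List.replicate n.toNat (-1)
  let st := edges.foldl pvStepB (comp0, val0)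
  queries.map (fun q =>
    if PySem.List.pyGetD st.1 q.1 0 ≠ PySem.List.pyGetD st.1 q.2 0 then -1
    else PySem.List.pyGetD st.2 (PySem.List.pyGetD st.1 q.1 0) 0)

-- ===== PRECONDITION & SPEC =====
-- Pre_ admits every input on which A returns: all node indices in [-n, n)
-- (an index outside that range makes A raise IndexError; negative indices wrap
-- around the arrays, in both programs alike).
def Pre_minimumCost2 (n : Int) (edges : List (Int × Int × Int)) (queries : List (Int × Int)) : Prop :=
  (∀ e ∈ edges, -n ≤ e.1 ∧ e.1 < n ∧ -n ≤ e.2.1 ∧ e.2.1 < n) ∧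
  (∀ q ∈ queries, -n ≤ q.1 ∧ q.1 < n ∧ -n ≤ q.2 ∧ q.2 < n)
instance (n : Int) (edges : List (Int × Int × Int)) (queries : List (Int × Int)) : Decidable (Pre_minimumCost2 n edges queries) := by unfold Pre_minimumCost2; infer_instance

def pvWitness_minimumCost2 : Int × (List (Int × Int × Int)) × (List (Int × Int)) :=
  (3, [(0, 1, 5), (1, 2, 7)], [(0, 2), (0, 0)])

def Spec_minimumCost2 (n : Int) (edges : List (Int × Int × Int)) (queries : List (Int × Int)) (out : List Int) : Prop := out = minimumCost2_alt n edges queries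
instance (n : Int) (edges : List (Int × Int × Int)) (queries : List (Int × Int)) (out : List Int) : Decidable (Spec_minimumCost2 n edges queries out) := by unfold Spec_minimumCost2; infer_instance

-- ===== CLAIM (what is proved, stated in full; the proofs are below) =====
def Claim_equal_minimumCost2 : Prop := ∀ (n : Int) (edges : List (Int × Int × Int)) (queries : List (Int × Int)), Dom_minimumCost2 n edges queries → Pre_minimumCost2 n edges queries → Spec_minimumCost2 n edges queries (minimumCost2 n edges queries)

-- ===== LEMMAS AND PROOFS =====

-- `x` is a valid node index for an array of length `len`
def pvIdx (len : Nat) (x : Int) : Prop := 0 ≤ x ∧ x < (len : Int)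

-- `x` is an index Python accepts for an array of length `len` (negative = from the end)
def pvIdxW (len : Nat) (x : Int) : Prop := -(len : Int) ≤ x ∧ x < (len : Int)

-- the array position a Python index denotes
def pvWrap (len : Nat) (x : Int) : Int := if x < 0 then x + len else x

-- `pvRt fa x r d`: following parent pointers from x reaches the root r in d steps
inductive pvRt (fa : List Int) : Int → Int → Nat → Prop
  | root (x : Int) (h : PySem.List.pyGetD fa x 0 = x) : pvRt fa x x 0
  | step (x r : Int) (d : Nat) (h : PySem.List.pyGetD fa x 0 ≠ x)
      (ih : pvRt fa (PySem.List.pyGetD fa x 0) r d) : pvRt fa x r (d+1)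

-- all parent pointers stay inside the array
def pvGood (fa : List Int) : Prop :=
  ∀ x : Int, pvIdx fa.length x → pvIdx fa.length (PySem.List.pyGetD fa x 0)

-- the simulation invariant relating A's state (fa, andv) to B's state (comp, val):
-- comp[i] is exactly the union-find root of i (with chain length < B), val IS andv
def pvInv (len B : Nat) (fa andv comp val : List Int) : Prop :=
  fa.length = len ∧ andv.length = len ∧ comp.length = len ∧ val = andv ∧ pvGood fa ∧
  ∀ x : Int, pvIdx len x → ∃ d, d < B ∧ pvRt fa x (PySem.List.pyGetD comp x 0) d

-- indexing bridges ---------------------------------------------------------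

theorem pvGet_set_self (xs : List Int) {y : Int} (v : Int) (h0 : 0 ≤ y)
    (h1 : y < (xs.length : Int)) :
    PySem.List.pyGetD (PySem.List.pySetD xs y v) y 0 = v := by
  rw [PySem.List.pySetD_of_nonneg xs v h0,
      PySem.List.pyGetD_eq_getElem _ _ h0 (by simpa using h1)]
  simp

theorem pvGet_set_other (xs : List Int) {y z : Int} (v : Int) (h0 : 0 ≤ y)
    (h1 : y < (xs.length : Int)) (h0' : 0 ≤ z) (h1' : z < (xs.length : Int))
    (hne : z ≠ y) :
    PySem.List.pyGetD (PySem.List.pySetD xs y v) z 0 = PySem.List.pyGetD xs z 0 := by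
  rw [PySem.List.pySetD_of_nonneg xs v h0,
      PySem.List.pyGetD_eq_getElem _ _ h0' (by simpa using h1'),
      PySem.List.pyGetD_eq_getElem _ _ h0' h1']
  rw [List.getElem_set]
  simp only [if_neg (by omega : ¬ y.toNat = z.toNat)]

theorem pvGet_map (f : Int → Int) (xs : List Int) {z : Int} (h0 : 0 ≤ z)
    (h1 : z < (xs.length : Int)) :
    PySem.List.pyGetD (xs.map f) z 0 = f (PySem.List.pyGetD xs z 0) := by
  rw [PySem.List.pyGetD_eq_getElem _ _ h0 (by simpa using h1),
      PySem.List.pyGetD_eq_getElem _ _ h0 h1]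
  simp

theorem pvGet_neg (xs : List Int) {x : Int} (h0 : -(xs.length : Int) ≤ x) (h1 : x < 0) :
    PySem.List.pyGetD xs x 0 = PySem.List.pyGetD xs (x + xs.length) 0 := by
  have hk : x = -(((-x).toNat : Nat) : Int) := by omega
  rw [hk, PySem.List.pyGetD_neg_natCast xs (-x).toNat 0 (by omega) (by omega),
      PySem.List.pyGetD_eq_getElem _ _ (by omega) (by omega)]
  congr 1
  omega

theorem pvSet_neg (xs : List Int) (v : Int) {x : Int} (h0 : -(xs.length : Int) ≤ x)
    (h1 : x < 0) :
    PySem.List.pySetD xs x v = PySem.List.pySetD xs (x + xs.length) v := by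
  have hR : PySem.List.pySetD xs (x + xs.length) v = xs.set (x + xs.length).toNat v :=
    PySem.List.pySetD_of_nonneg xs v (by omega)
  rw [hR]
  simp only [PySem.List.pySetD, PySem.List.pySet?, PySem.List.pyIdx?]
  rw [if_neg (by omega : ¬ 0 ≤ x), if_pos h0]
  simp only [Option.map_some, Option.getD_some]
  congr 1
  omega

theorem pvGet_wrap (xs : List Int) {x : Int} (hx : pvIdxW xs.length x) :
    PySem.List.pyGetD xs x 0 = PySem.List.pyGetD xs (pvWrap xs.length x) 0 := by
  unfold pvWrap
  split_ifs with h
  · exact pvGet_neg xs hx.1 h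
  · rfl

theorem pvWrap_idx {len : Nat} {x : Int} (hx : pvIdxW len x) : pvIdx len (pvWrap len x) := by
  obtain ⟨h0, h1⟩ := hx
  unfold pvWrap
  split_ifs with h <;> exact ⟨by omega, by omega⟩

theorem pvLen_range (n : Int) : (PySem.List.pyRange 0 n 1).length = n.toNat := by
  simp [PySem.List.length_pyRange_one]

theorem pvGet_range (n : Int) {x : Int} (h0 : 0 ≤ x) (h1 : x < n) :
    PySem.List.pyGetD (PySem.List.pyRange 0 n 1) x 0 = x := by
  rw [PySem.List.pyGetD_eq_getElem _ _ h0 (by rw [pvLen_range]; omega),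
      PySem.List.getElem_pyRange_one]
  omega

-- root-path facts ----------------------------------------------------------

theorem pvRt_unique {fa : List Int} {x r r' : Int} {d d' : Nat}
    (h : pvRt fa x r d) (h' : pvRt fa x r' d') : r = r' ∧ d = d' := by
  induction h generalizing r' d' with
  | root z hz => cases h' with
    | root _ _ => exact ⟨rfl, rfl⟩
    | step _ _ _ h2 _ => exact absurd hz h2
  | step z r d hz hp ih => cases h' with
    | root _ h2 => exact absurd h2 hz
    | step _ _ _ _ hp' =>
      obtain ⟨he, hd⟩ := ih hp'
      exact ⟨he, by omega⟩

theorem pvRt_fix {fa : List Int} {x r : Int} {d : Nat} (h : pvRt fa x r d) :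
    PySem.List.pyGetD fa r 0 = r := by
  induction h with
  | root z hz => exact hz
  | step _ _ _ _ _ ih => exact ih

theorem pvRt_idx {fa : List Int} {x r : Int} {d : Nat} (hg : pvGood fa)
    (hx : pvIdx fa.length x) (h : pvRt fa x r d) : pvIdx fa.length r := by
  induction h with
  | root z hz => exact hx
  | step z r d hz hp ih => exact ih (hg z hx)

-- path compression (writing a root over some node's parent) preserves roots,
-- without lengthening any chain
theorem pvRt_set_preserve {fa : List Int} {x r : Int} {dx : Nat} (hg : pvGood fa)
    (hx : pvIdx fa.length x) (hxr : pvRt fa x r dx) :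
    ∀ {y ρ : Int} {dy : Nat}, pvRt fa y ρ dy → pvIdx fa.length y →
      ∃ d' ≤ dy, pvRt (PySem.List.pySetD fa x r) y ρ d' := by
  intro y ρ dy hy
  induction hy with
  | root z hz =>
    intro hziz
    by_cases hzx : z = x
    · subst hzx
      obtain ⟨hr, -⟩ := pvRt_unique hxr (pvRt.root z hz)
      refine ⟨0, le_rfl, pvRt.root z ?_⟩
      rw [hr]
      exact pvGet_set_self fa z hziz.1 hziz.2
    · refine ⟨0, le_rfl, pvRt.root z ?_⟩
      rw [pvGet_set_other fa r hx.1 hx.2 hziz.1 hziz.2 hzx]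
      exact hz
  | step z ρ' d hz hp ih =>
    intro hziz
    by_cases hzx : z = x
    · subst hzx
      obtain ⟨hrr, -⟩ := pvRt_unique (pvRt.step z ρ' d hz hp) hxr
      have hrfix : PySem.List.pyGetD fa r 0 = r := pvRt_fix hxr
      have hrneq : r ≠ z := fun h => hz (h ▸ hrfix)
      have hridx : pvIdx fa.length r := pvRt_idx hg hx hxr
      have g1 : PySem.List.pyGetD (PySem.List.pySetD fa z r) z 0 = r :=
        pvGet_set_self fa r hziz.1 hziz.2
      have g2 : PySem.List.pyGetD (PySem.List.pySetD fa z r) r 0 = r := by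
        rw [pvGet_set_other fa r hziz.1 hziz.2 hridx.1 hridx.2 hrneq]
        exact hrfix
      refine ⟨1, by omega, ?_⟩
      rw [hrr]
      refine pvRt.step z r 0 (by rw [g1]; exact hrneq) ?_
      rw [g1]
      exact pvRt.root r g2
    · have hpidx : pvIdx fa.length (PySem.List.pyGetD fa z 0) := hg z hziz
      obtain ⟨d'', hle, hpp⟩ := ih hpidx
      have gz : PySem.List.pyGetD (PySem.List.pySetD fa x r) z 0 = PySem.List.pyGetD fa z 0 :=
        pvGet_set_other fa r hx.1 hx.2 hziz.1 hziz.2 hzx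
      refine ⟨d'' + 1, by omega, ?_⟩
      refine pvRt.step z ρ' d'' ?_ ?_
      · rw [gz]; exact hz
      · rw [gz]; exact hpp

theorem pvGood_set {fa : List Int} {x r : Int} (hg : pvGood fa)
    (hx : pvIdx fa.length x) (hr : pvIdx fa.length r) :
    pvGood (PySem.List.pySetD fa x r) := by
  intro z hziz
  simp only [PySem.List.length_pySetD] at hziz ⊢
  by_cases hzx : z = x
  · subst hzx
    rw [pvGet_set_self fa r hziz.1 hziz.2]
    exact hr
  · rw [pvGet_set_other fa r hx.1 hx.2 hziz.1 hziz.2 hzx]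
    exact hg z hziz

-- linking one root under another re-roots exactly its class
theorem pvRt_union {fa : List Int} {x' y' : Int} (hg : pvGood fa)
    (hx : pvIdx fa.length x') (hy : pvIdx fa.length y')
    (hrx : PySem.List.pyGetD fa x' 0 = x') (hry : PySem.List.pyGetD fa y' 0 = y')
    (hne : x' ≠ y') :
    ∀ {y ρ : Int} {dy : Nat}, pvRt fa y ρ dy → pvIdx fa.length y →
      pvRt (PySem.List.pySetD fa x' y') y (if ρ = x' then y' else ρ)
        (if ρ = x' then dy + 1 else dy) := by
  intro y ρ dy hder
  induction hder with
  | root z hz =>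
    intro hziz
    by_cases hzx : z = x'
    · subst hzx
      rw [if_pos rfl, if_pos rfl]
      refine pvRt.step z y' 0 ?_ ?_
      · rw [pvGet_set_self fa y' hx.1 hx.2]
        exact Ne.symm hne
      · rw [pvGet_set_self fa y' hx.1 hx.2]
        refine pvRt.root y' ?_
        rw [pvGet_set_other fa y' hx.1 hx.2 hy.1 hy.2 (Ne.symm hne)]
        exact hry
    · rw [if_neg hzx, if_neg hzx]
      refine pvRt.root z ?_
      rw [pvGet_set_other fa y' hx.1 hx.2 hziz.1 hziz.2 hzx]
      exact hz
  | step z ρ d hz hp ih =>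
    intro hziz
    have hzx : z ≠ x' := fun h => hz (by rw [h]; exact hrx)
    have gz : PySem.List.pyGetD (PySem.List.pySetD fa x' y') z 0 = PySem.List.pyGetD fa z 0 :=
      pvGet_set_other fa y' hx.1 hx.2 hziz.1 hziz.2 hzx
    have hrec := ih (hg z hziz)
    by_cases hρ : ρ = x'
    · simp only [if_pos hρ] at hrec ⊢
      exact pvRt.step z y' (d + 1) (by rw [gz]; exact hz) (by rw [gz]; exact hrec)
    · simp only [if_neg hρ] at hrec ⊢
      exact pvRt.step z ρ d (by rw [gz]; exact hz) (by rw [gz]; exact hrec)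

-- find -----------------------------------------------------------------------

theorem pvFind_spec : ∀ (fuel : Nat) (fa : List Int) (x r : Int) (d : Nat),
    pvGood fa → pvIdx fa.length x → pvRt fa x r d → d < fuel →
    (pvFind fuel fa x).2 = r ∧ (pvFind fuel fa x).1.length = fa.length ∧
    pvGood (pvFind fuel fa x).1 ∧
    (∀ y ρ : Int, ∀ dy : Nat, pvIdx fa.length y → pvRt fa y ρ dy →
      ∃ d' ≤ dy, pvRt (pvFind fuel fa x).1 y ρ d') := by
  intro fuel
  induction fuel with
  | zero => intro fa x r d hg hx hrt hd; omega
  | succ f ih =>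
    intro fa x r d hg hx hrt hdf
    by_cases hpx : PySem.List.pyGetD fa x 0 = x
    · obtain ⟨hrx, -⟩ := pvRt_unique hrt (pvRt.root x hpx)
      simp only [pvFind, if_pos hpx]
      exact ⟨hrx.symm, trivial, hg, fun y ρ dy hyi hyr => ⟨dy, le_rfl, hyr⟩⟩
    · have hder : ∃ d₀, d = d₀ + 1 ∧ pvRt fa (PySem.List.pyGetD fa x 0) r d₀ := by
        cases hrt with
        | root _ h => exact absurd h hpx
        | step _ _ d₀ _ hp => exact ⟨d₀, rfl, hp⟩
      obtain ⟨d₀, hd0, hp⟩ := hder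
      have hpidx := hg x hx
      obtain ⟨hres2, hlen1, hgood1, hpres1⟩ :=
        ih fa (PySem.List.pyGetD fa x 0) r d₀ hg hpidx hp (by omega)
      obtain ⟨dx1, hdx1, hrt1⟩ := hpres1 x r d hx hrt
      have hx1 : pvIdx (pvFind f fa (PySem.List.pyGetD fa x 0)).1.length x := by
        rw [hlen1]; exact hx
      have hr1idx : pvIdx (pvFind f fa (PySem.List.pyGetD fa x 0)).1.length r :=
        pvRt_idx hgood1 hx1 hrt1
      simp only [pvFind, if_neg hpx]
      refine ⟨?_, ?_, ?_, ?_⟩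
      · exact hres2
      · rw [hres2, PySem.List.length_pySetD, hlen1]
      · rw [hres2]
        exact pvGood_set hgood1 hx1 (hres2 ▸ hr1idx)
      · intro y ρ dy hyi hyr
        obtain ⟨d₂, hd₂, h₂⟩ := hpres1 y ρ dy hyi hyr
        obtain ⟨d₃, hd₃, h₃⟩ := pvRt_set_preserve hgood1 hx1 hrt1 h₂ (by rw [hlen1]; exact hyi)
        rw [hres2]
        exact ⟨d₃, le_trans hd₃ hd₂, h₃⟩

-- find on a possibly negative (wrapping) index
theorem pvFind_specW (fuel : Nat) (fa : List Int) (x r : Int) (d : Nat)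
    (hg : pvGood fa) (hx : pvIdxW fa.length x)
    (hrt : pvRt fa (pvWrap fa.length x) r d) (hdf : d + 1 < fuel) :
    (pvFind fuel fa x).2 = r ∧ (pvFind fuel fa x).1.length = fa.length ∧
    pvGood (pvFind fuel fa x).1 ∧
    (∀ y ρ : Int, ∀ dy : Nat, pvIdx fa.length y → pvRt fa y ρ dy →
      ∃ d' ≤ dy, pvRt (pvFind fuel fa x).1 y ρ d') := by
  obtain ⟨hxl, hxu⟩ := hx
  by_cases hneg : x < 0
  · simp only [pvWrap, if_pos hneg] at hrt
    have hx0 : pvIdx fa.length (x + fa.length) := ⟨by omega, by omega⟩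
    cases fuel with
    | zero => omega
    | succ f =>
      have hgx : PySem.List.pyGetD fa x 0 = PySem.List.pyGetD fa (x + fa.length) 0 :=
        pvGet_neg fa hxl hneg
      have hpidx := hg _ hx0
      have hpx : ¬ PySem.List.pyGetD fa x 0 = x := by
        rw [hgx]; have := hpidx.1; omega
      have hp' : ∃ d' ≤ d, pvRt fa (PySem.List.pyGetD fa (x + fa.length) 0) r d' := by
        cases hrt with
        | root z hz => exact ⟨0, le_rfl, by rw [hz]; exact pvRt.root _ hz⟩
        | step z rr dd hzz hpp => exact ⟨dd, by omega, hpp⟩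
      obtain ⟨d', hd', hp⟩ := hp'
      obtain ⟨hres2, hlen1, hgood1, hpres1⟩ :=
        pvFind_spec f fa (PySem.List.pyGetD fa (x + fa.length) 0) r d' hg hpidx hp (by omega)
      obtain ⟨dx1, hdx1, hrt1⟩ := hpres1 (x + fa.length) r d hx0 hrt
      have hsetw : PySem.List.pySetD (pvFind f fa (PySem.List.pyGetD fa (x + fa.length) 0)).1 x r
          = PySem.List.pySetD (pvFind f fa (PySem.List.pyGetD fa (x + fa.length) 0)).1
              (x + fa.length) r := by
        have := pvSet_neg (pvFind f fa (PySem.List.pyGetD fa (x + fa.length) 0)).1 r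
          (x := x) (by rw [hlen1]; exact hxl) hneg
        rw [this, hlen1]
      have hx1 : pvIdx (pvFind f fa (PySem.List.pyGetD fa (x + fa.length) 0)).1.length
          (x + fa.length) := by rw [hlen1]; exact hx0
      have hr1idx := pvRt_idx hgood1 hx1 hrt1
      simp only [pvFind, if_neg hpx]
      rw [hgx]
      refine ⟨hres2, ?_, ?_, ?_⟩
      · rw [PySem.List.length_pySetD, hlen1]
      · rw [hres2, hsetw]
        exact pvGood_set hgood1 hx1 hr1idx
      · intro y ρ dy hyi hyr
        obtain ⟨d₂, hd₂, h₂⟩ := hpres1 y ρ dy hyi hyr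
        obtain ⟨d₃, hd₃, h₃⟩ := pvRt_set_preserve hgood1 hx1 hrt1 h₂ (by rw [hlen1]; exact hyi)
        rw [hres2, hsetw]
        exact ⟨d₃, le_trans hd₃ hd₂, h₃⟩
  · simp only [pvWrap, if_neg hneg] at hrt
    exact pvFind_spec fuel fa x r d hg ⟨by omega, hxu⟩ hrt (by omega)

-- edge loop ------------------------------------------------------------------

theorem pvStep_inv {len B L : Nat} {fa andv comp val : List Int}
    (hBL : B < L) (hI : pvInv len B fa andv comp val) (e : Int × Int × Int)
    (hex : pvIdxW len e.1) (hey : pvIdxW len e.2.1) :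
    pvInv len (B + 1) (pvStepA L (fa, andv) e).1 (pvStepA L (fa, andv) e).2
      (pvStepB (comp, val) e).1 (pvStepB (comp, val) e).2 := by
  obtain ⟨hfl, hal, hcl, hva, hgood, hroots⟩ := hI
  have hx0 : pvIdx len (pvWrap len e.1) := pvWrap_idx hex
  have hy0 : pvIdx len (pvWrap len e.2.1) := pvWrap_idx hey
  obtain ⟨dx, hdx, hrtx⟩ := hroots (pvWrap len e.1) hx0
  obtain ⟨dy, hdy, hrty⟩ := hroots (pvWrap len e.2.1) hy0
  have hex' : pvIdxW fa.length e.1 := by rw [hfl]; exact hex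
  have hey' : pvIdxW fa.length e.2.1 := by rw [hfl]; exact hey
  have hx0' : pvIdx fa.length (pvWrap len e.1) := by rw [hfl]; exact hx0
  have hy0' : pvIdx fa.length (pvWrap len e.2.1) := by rw [hfl]; exact hy0
  have hrtx' : pvRt fa (pvWrap fa.length e.1) (PySem.List.pyGetD comp (pvWrap len e.1) 0) dx := by
    rw [hfl]; exact hrtx
  obtain ⟨hf12, hf1len, hf1good, hf1pres⟩ :=
    pvFind_specW L fa e.1 (PySem.List.pyGetD comp (pvWrap len e.1) 0) dx hgood hex' hrtx'
      (by omega)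
  obtain ⟨dy1, hdy1, hrty1⟩ := hf1pres (pvWrap len e.2.1)
    (PySem.List.pyGetD comp (pvWrap len e.2.1) 0) dy hy0' hrty
  have hrty1' : pvRt (pvFind L fa e.1).1 (pvWrap (pvFind L fa e.1).1.length e.2.1)
      (PySem.List.pyGetD comp (pvWrap len e.2.1) 0) dy1 := by rw [hf1len, hfl]; exact hrty1
  obtain ⟨hf22, hf2len, hf2good, hf2pres⟩ :=
    pvFind_specW L (pvFind L fa e.1).1 e.2.1 (PySem.List.pyGetD comp (pvWrap len e.2.1) 0) dy1
      hf1good (by rw [hf1len]; exact hey') hrty1' (by omega)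
  have hlen2 : (pvFind L (pvFind L fa e.1).1 e.2.1).1.length = len := by
    rw [hf2len, hf1len, hfl]
  have hpres : ∀ z : Int, pvIdx len z → ∃ d, d < B ∧
      pvRt (pvFind L (pvFind L fa e.1).1 e.2.1).1 z (PySem.List.pyGetD comp z 0) d := by
    intro z hz
    obtain ⟨d, hd, hrt⟩ := hroots z hz
    have hz' : pvIdx fa.length z := by rw [hfl]; exact hz
    obtain ⟨d1, hd1, h1⟩ := hf1pres z _ d hz' hrt
    obtain ⟨d2, hd2, h2⟩ := hf2pres z _ d1 (by rw [hf1len]; exact hz') h1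
    exact ⟨d2, by omega, h2⟩
  have hcxi : pvIdx len (PySem.List.pyGetD comp (pvWrap len e.1) 0) := by
    have h := pvRt_idx hgood hx0' hrtx; rw [hfl] at h; exact h
  have hcyi : pvIdx len (PySem.List.pyGetD comp (pvWrap len e.2.1) 0) := by
    have h := pvRt_idx hgood hy0' hrty; rw [hfl] at h; exact h
  obtain ⟨dcx, -, hrtcx⟩ := hpres (pvWrap len e.1) hx0
  obtain ⟨dcy, -, hrtcy⟩ := hpres (pvWrap len e.2.1) hy0
  have hfixx := pvRt_fix hrtcx
  have hfixy := pvRt_fix hrtcy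
  have hBx : PySem.List.pyGetD comp e.1 0 = PySem.List.pyGetD comp (pvWrap len e.1) 0 := by
    have h := pvGet_wrap comp (x := e.1) (by rw [hcl]; exact hex)
    rw [h, hcl]
  have hBy : PySem.List.pyGetD comp e.2.1 0 = PySem.List.pyGetD comp (pvWrap len e.2.1) 0 := by
    have h := pvGet_wrap comp (x := e.2.1) (by rw [hcl]; exact hey)
    rw [h, hcl]
  simp only [pvStepA, pvStepB]
  rw [hva, hf12, hf22, hBx, hBy]
  by_cases hcc : PySem.List.pyGetD comp (pvWrap len e.1) 0 = PySem.List.pyGetD comp (pvWrap len e.2.1) 0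
  · rw [if_neg (not_not_intro hcc), if_neg (not_not_intro hcc)]
    refine ⟨hlen2, ?_, hcl, rfl, hf2good, ?_⟩
    · rw [PySem.List.length_pySetD, hal]
    · intro z hz
      obtain ⟨d, hd, h⟩ := hpres z hz
      exact ⟨d, by omega, h⟩
  · rw [if_pos hcc, if_pos hcc]
    refine ⟨?_, ?_, ?_, rfl, ?_, ?_⟩
    · rw [PySem.List.length_pySetD, hlen2]
    · rw [PySem.List.length_pySetD, PySem.List.length_pySetD, hal]
    · rw [List.length_map, hcl]
    · exact pvGood_set hf2good (by rw [hlen2]; exact hcxi) (by rw [hlen2]; exact hcyi)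
    · intro z hz
      obtain ⟨d, hd, h⟩ := hpres z hz
      have hmap : PySem.List.pyGetD (comp.map fun c =>
          if c = PySem.List.pyGetD comp (pvWrap len e.1) 0 then PySem.List.pyGetD comp (pvWrap len e.2.1) 0 else c) z 0 =
          if PySem.List.pyGetD comp z 0 = PySem.List.pyGetD comp (pvWrap len e.1) 0 then
            PySem.List.pyGetD comp (pvWrap len e.2.1) 0 else PySem.List.pyGetD comp z 0 :=
        pvGet_map _ comp hz.1 (by rw [hcl]; exact hz.2)
      rw [hmap]
      have hu := pvRt_union hf2good (by rw [hlen2]; exact hcxi) (by rw [hlen2]; exact hcyi)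
        hfixx hfixy hcc h (by rw [hlen2]; exact hz)
      exact ⟨if PySem.List.pyGetD comp z 0 = PySem.List.pyGetD comp (pvWrap len e.1) 0 then d + 1 else d,
        by split_ifs <;> omega, hu⟩

theorem pvFold_inv {len L : Nat} : ∀ (es : List (Int × Int × Int)) {B : Nat}
    {fa andv comp val : List Int},
    pvInv len B fa andv comp val → (∀ e ∈ es, pvIdxW len e.1 ∧ pvIdxW len e.2.1) →
    B + es.length ≤ L →
    pvInv len (B + es.length) (es.foldl (pvStepA L) (fa, andv)).1
      (es.foldl (pvStepA L) (fa, andv)).2 (es.foldl pvStepB (comp, val)).1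
      (es.foldl pvStepB (comp, val)).2 := by
  intro es
  induction es with
  | nil => intro B fa andv comp val hI hb hL; simpa using hI
  | cons e es ih =>
    intro B fa andv comp val hI hb hL
    have hstep := pvStep_inv (len := len) (B := B) (L := L) (by simp at hL; omega) hI e
      (hb e (by simp)).1 (hb e (by simp)).2
    have hrec := ih hstep (fun e' he' => hb e' (by simp [he'])) (by simp at hL ⊢; omega)
    have hlen : B + (e :: es).length = (B + 1) + es.length := by simp; omega
    rw [hlen]
    simpa [List.foldl_cons] using hrec

-- query loop -----------------------------------------------------------------

theorem pvQuery_fold {len B L : Nat} {andv comp val : List Int} :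
    ∀ (qs : List (Int × Int)) (fa : List Int) (acc : List Int),
    pvInv len B fa andv comp val → B < L →
    (∀ q ∈ qs, pvIdxW len q.1 ∧ pvIdxW len q.2) →
    (qs.foldl (pvQueryA L andv) (fa, acc)).2 = acc ++ qs.map (fun q =>
      if PySem.List.pyGetD comp q.1 0 ≠ PySem.List.pyGetD comp q.2 0 then -1
      else PySem.List.pyGetD val (PySem.List.pyGetD comp q.1 0) 0) := by
  intro qs
  induction qs with
  | nil => intro fa acc hI hBL hq; simp
  | cons q qs ih =>
    intro fa acc hI hBL hq
    obtain ⟨hfl, hal, hcl, hva, hgood, hroots⟩ := hI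
    obtain ⟨hqs, hqt⟩ := hq q (by simp)
    have hs0 : pvIdx len (pvWrap len q.1) := pvWrap_idx hqs
    have ht0 : pvIdx len (pvWrap len q.2) := pvWrap_idx hqt
    obtain ⟨ds, hds, hrts⟩ := hroots (pvWrap len q.1) hs0
    obtain ⟨dt, hdt, hrtt⟩ := hroots (pvWrap len q.2) ht0
    have hqs' : pvIdxW fa.length q.1 := by rw [hfl]; exact hqs
    have hqt' : pvIdxW fa.length q.2 := by rw [hfl]; exact hqt
    have hs0' : pvIdx fa.length (pvWrap len q.1) := by rw [hfl]; exact hs0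
    have ht0' : pvIdx fa.length (pvWrap len q.2) := by rw [hfl]; exact ht0
    have hrts' : pvRt fa (pvWrap fa.length q.1) (PySem.List.pyGetD comp (pvWrap len q.1) 0) ds := by
      rw [hfl]; exact hrts
    obtain ⟨hf12, hf1len, hf1good, hf1pres⟩ :=
      pvFind_specW L fa q.1 (PySem.List.pyGetD comp (pvWrap len q.1) 0) ds hgood hqs' hrts'
        (by omega)
    obtain ⟨dt1, hdt1, hrtt1⟩ := hf1pres (pvWrap len q.2)
      (PySem.List.pyGetD comp (pvWrap len q.2) 0) dt ht0' hrtt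
    have hrtt1' : pvRt (pvFind L fa q.1).1 (pvWrap (pvFind L fa q.1).1.length q.2)
        (PySem.List.pyGetD comp (pvWrap len q.2) 0) dt1 := by rw [hf1len, hfl]; exact hrtt1
    obtain ⟨hf22, hf2len, hf2good, hf2pres⟩ :=
      pvFind_specW L (pvFind L fa q.1).1 q.2 (PySem.List.pyGetD comp (pvWrap len q.2) 0) dt1
        hf1good (by rw [hf1len]; exact hqt') hrtt1' (by omega)
    have hBs : PySem.List.pyGetD comp q.1 0 = PySem.List.pyGetD comp (pvWrap len q.1) 0 := by
      have h := pvGet_wrap comp (x := q.1) (by rw [hcl]; exact hqs)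
      rw [h, hcl]
    have hBt : PySem.List.pyGetD comp q.2 0 = PySem.List.pyGetD comp (pvWrap len q.2) 0 := by
      have h := pvGet_wrap comp (x := q.2) (by rw [hcl]; exact hqt)
      rw [h, hcl]
    have hpres2 : ∀ z : Int, pvIdx len z → ∃ d, d < B ∧
        pvRt (pvFind L (pvFind L fa q.1).1 q.2).1 z (PySem.List.pyGetD comp z 0) d := by
      intro z hz
      obtain ⟨d, hd, hrt⟩ := hroots z hz
      have hz' : pvIdx fa.length z := by rw [hfl]; exact hz
      obtain ⟨d1, hd1, h1⟩ := hf1pres z _ d hz' hrt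
      obtain ⟨d2, hd2, h2⟩ := hf2pres z _ d1 (by rw [hf1len]; exact hz') h1
      exact ⟨d2, by omega, h2⟩
    have hlen2 : (pvFind L (pvFind L fa q.1).1 q.2).1.length = len := by
      rw [hf2len, hf1len, hfl]
    have hI2 : pvInv len B (pvFind L (pvFind L fa q.1).1 q.2).1 andv comp val :=
      ⟨hlen2, hal, hcl, hva, hf2good, hpres2⟩
    rw [List.foldl_cons]
    by_cases hcc : PySem.List.pyGetD comp (pvWrap len q.1) 0 =
        PySem.List.pyGetD comp (pvWrap len q.2) 0
    · -- equal roots: third find, element and_[find(s)]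
      obtain ⟨ds2, hds2, hrts2⟩ := hpres2 (pvWrap len q.1) hs0
      have hrts2' : pvRt (pvFind L (pvFind L fa q.1).1 q.2).1
          (pvWrap (pvFind L (pvFind L fa q.1).1 q.2).1.length q.1)
          (PySem.List.pyGetD comp (pvWrap len q.1) 0) ds2 := by rw [hlen2]; exact hrts2
      obtain ⟨hf32, hf3len, hf3good, hf3pres⟩ :=
        pvFind_specW L (pvFind L (pvFind L fa q.1).1 q.2).1 q.1
          (PySem.List.pyGetD comp (pvWrap len q.1) 0) ds2 hf2good
          (by rw [hlen2]; exact hqs) hrts2' (by omega)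
      have hpres3 : ∀ z : Int, pvIdx len z → ∃ d, d < B ∧
          pvRt (pvFind L (pvFind L (pvFind L fa q.1).1 q.2).1 q.1).1 z
            (PySem.List.pyGetD comp z 0) d := by
        intro z hz
        obtain ⟨d, hd, h⟩ := hpres2 z hz
        obtain ⟨d3, hd3, h3⟩ := hf3pres z _ d (by rw [hlen2]; exact hz) h
        exact ⟨d3, by omega, h3⟩
      have hI3 : pvInv len B (pvFind L (pvFind L (pvFind L fa q.1).1 q.2).1 q.1).1 andv comp val :=
        ⟨by rw [hf3len, hlen2], hal, hcl, hva, hf3good, hpres3⟩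
      have hrec := ih (pvFind L (pvFind L (pvFind L fa q.1).1 q.2).1 q.1).1
        (acc ++ [PySem.List.pyGetD andv (PySem.List.pyGetD comp (pvWrap len q.1) 0) 0]) hI3 hBL
        (fun q' hq' => hq q' (by simp [hq']))
      simp only [pvQueryA, hf12, hf22, hf32, if_neg (not_not_intro hcc)]
      rw [hrec, List.map_cons, hBs, hBt, if_neg (not_not_intro hcc), hva]
      simp
    · have hrec := ih (pvFind L (pvFind L fa q.1).1 q.2).1 (acc ++ [-1]) hI2 hBL
        (fun q' hq' => hq q' (by simp [hq']))
      simp only [pvQueryA, hf12, hf22, if_pos hcc]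
      rw [hrec, List.map_cons, hBs, hBt, if_pos hcc]
      simp

-- ===== VERDICT (by name: the statement is the Claim_ definition above) =====
theorem minimumCost2_spec : Claim_equal_minimumCost2 := by
  intro n edges queries hdom hpre
  obtain ⟨hpe, hpq⟩ := hpre
  unfold Spec_minimumCost2
  simp only [minimumCost2, minimumCost2_alt]
  have hlr := pvLen_range n
  have hInv0 : pvInv n.toNat 1 (PySem.List.pyRange 0 n 1) (List.replicate n.toNat (-1))
      (PySem.List.pyRange 0 n 1) (List.replicate n.toNat (-1)) := by
    refine ⟨hlr, by simp, hlr, rfl, ?_, ?_⟩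
    · intro x hx
      simp only [hlr] at hx ⊢
      obtain ⟨h0, h1⟩ := hx
      rw [pvGet_range n h0 (by omega)]
      exact ⟨h0, h1⟩
    · intro x hx
      obtain ⟨h0, h1⟩ := hx
      refine ⟨0, by omega, ?_⟩
      have hgr := pvGet_range n h0 (by omega : x < n)
      rw [hgr]
      exact pvRt.root x hgr
  have hbe : ∀ e ∈ edges, pvIdxW n.toNat e.1 ∧ pvIdxW n.toNat e.2.1 := by
    intro e he
    obtain ⟨h1, h2, h3, h4⟩ := hpe e he
    exact ⟨⟨by omega, by omega⟩, ⟨by omega, by omega⟩⟩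
  have hFold := pvFold_inv (len := n.toNat)
      (L := (PySem.List.pyRange 0 n 1).length + edges.length + 1) edges hInv0 hbe
      (by rw [hlr]; omega)
  by_cases hq0 : 0 < n.toNat
  · have hbq : ∀ q ∈ queries, pvIdxW n.toNat q.1 ∧ pvIdxW n.toNat q.2 := by
      intro q hqm
      obtain ⟨h1, h2, h3, h4⟩ := hpq q hqm
      exact ⟨⟨by omega, by omega⟩, ⟨by omega, by omega⟩⟩
    have hQ := pvQuery_fold (len := n.toNat) (B := 1 + edges.length)
      (L := (PySem.List.pyRange 0 n 1).length + edges.length + 1) queries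
      (edges.foldl (pvStepA ((PySem.List.pyRange 0 n 1).length + edges.length + 1))
        (PySem.List.pyRange 0 n 1, List.replicate n.toNat (-1))).1 [] hFold
      (by rw [hlr]; omega) hbq
    rw [hQ]
    simp
  · have hqe : queries = [] := by
      cases queries with
      | nil => rfl
      | cons q qs =>
        obtain ⟨h1, h2, -⟩ := hpq q (by simp)
        exact absurd h2 (by omega)
    subst hqe
    simp
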